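-- pv_equiv track=rewrite | github.com/Tonner-Zech-Group/VASP-tools | src/tools4vasp/split_surf_and_mol.py | get_no_atoms_in_layer
-- ===== SOURCE A (Python) =====
-- def get_no_atoms_in_layer(plat_height, no_atoms):
--     # Function that determines the number of atoms in a layer by checking the most occuring and heighest plateau height
--     occurence = {}
--     for x in plat_height:
--         occurence[x] = occurence.get(x, 0) + 1
--     best_value = 0
--     best_count = -1
--     for value, count in occurence.items():
--         if value >= max(9,no_atoms/20): ### to only count layers with at least 9 atoms or one twentieth of all atoms - arbitrary values that yielded good results in tests
--             if count > best_count or (count == best_count and value > best_value):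
--                 best_value = value
--                 best_count = count
--     return best_value
-- ===== SOURCE B (Python) =====
-- def get_no_atoms_in_layer(plat_height, no_atoms):
--     # Sort once and scan runs of equal heights; ascending order with '>=' reproduces
--     # A's "higher height wins count ties" rule.
--     s = sorted(plat_height)
--     best_value, best_count = 0, -1
--     i, n = 0, len(s)
--     while i < n:
--         v = s[i]
--         j = i
--         while j < n and s[j] == v:
--             j += 1
--         c = j - i
--         if v >= max(9, no_atoms / 20) and c >= best_count:
--             best_value, best_count = v, c
--         i = j
--     return best_value
-- ===== Notes on version B (the rewrite author's own statement) =====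
-- stated objective: alternative
-- what changed: Replaces the hash-count dictionary plus argmax-over-items pass by a single sort-then-run-length scan: sorted order makes equal heights contiguous, and a '>=' update in ascending order reproduces the higher-height-wins-ties rule.
import Mathlib
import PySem

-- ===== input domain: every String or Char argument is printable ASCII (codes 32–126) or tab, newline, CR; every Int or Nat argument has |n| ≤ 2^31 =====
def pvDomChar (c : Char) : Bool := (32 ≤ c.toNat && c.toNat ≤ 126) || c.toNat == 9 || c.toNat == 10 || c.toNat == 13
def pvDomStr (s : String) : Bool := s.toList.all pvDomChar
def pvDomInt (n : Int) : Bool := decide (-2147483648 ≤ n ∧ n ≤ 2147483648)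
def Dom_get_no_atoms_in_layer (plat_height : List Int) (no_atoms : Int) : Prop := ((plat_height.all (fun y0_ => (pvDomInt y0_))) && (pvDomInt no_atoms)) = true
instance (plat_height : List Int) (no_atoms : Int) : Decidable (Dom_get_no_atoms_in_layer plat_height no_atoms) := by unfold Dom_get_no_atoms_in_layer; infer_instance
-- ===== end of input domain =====

-- B replaces A's hash-count dictionary + argmax-over-items pass by a sort-then-run-length scan
-- (same result; a different algorithm of similar cost, not claimed faster).
-- In both ports the Python test `value >= max(9, no_atoms/20)` (float division) is ported as
-- `9 ≤ value ∧ no_atoms ≤ 20 * value`, which is exact for |ints| ≤ 2^31 (deciding an integer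
-- against n/20 in IEEE doubles coincides with 20*value ≥ n in that range).

-- ===== PORT A =====
def get_no_atoms_in_layer (plat_height : List Int) (no_atoms : Int) : Int :=
  let occurrence :=
    plat_height.foldl (fun d x => d.insert x (d.getD x 0 + 1)) PySem.Dict.empty
  let r := occurrence.items.foldl
    (fun (acc : Int × Int) vc =>
      if (9 ≤ vc.1 ∧ no_atoms ≤ 20 * vc.1) ∧
         (vc.2 > acc.2 ∨ (vc.2 = acc.2 ∧ vc.1 > acc.1)) then (vc.1, vc.2) else acc)
    (0, -1)
  r.1

-- ===== PORT B =====
-- The inner `while j < n and s[j] == v` scan of Source B is the takeWhile/dropWhile split of the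
-- suffix starting at i; the outer while-loop is this recursion consuming one run per step.
def pvRunLoop (no_atoms : Int) (s : List Int) (bv bc : Int) : Int :=
  match s with
  | [] => bv
  | v :: t =>
      let c : Int := 1 + (t.takeWhile (fun x => decide (x = v))).length
      let rest := t.dropWhile (fun x => decide (x = v))
      if (9 ≤ v ∧ no_atoms ≤ 20 * v) ∧ c ≥ bc then pvRunLoop no_atoms rest v c
      else pvRunLoop no_atoms rest bv bc
termination_by s.length
decreasing_by
  all_goals
    simpa using Nat.lt_succ_of_le (List.length_dropWhile_le (fun x => decide (x = v)) t)

def get_no_atoms_in_layer_alt (plat_height : List Int) (no_atoms : Int) : Int :=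
  pvRunLoop no_atoms (PySem.List.sorted plat_height (fun x => x) false) 0 (-1)

-- ===== PRECONDITION & SPEC =====
def Spec_get_no_atoms_in_layer (plat_height : List Int) (no_atoms : Int) (out : Int) : Prop := out = get_no_atoms_in_layer_alt plat_height no_atoms
instance (plat_height : List Int) (no_atoms : Int) (out : Int) : Decidable (Spec_get_no_atoms_in_layer plat_height no_atoms out) := by unfold Spec_get_no_atoms_in_layer; infer_instance

-- ===== CLAIM (what is proved, stated in full; the proofs are below) =====
def Claim_equal_get_no_atoms_in_layer : Prop := ∀ (plat_height : List Int) (no_atoms : Int), Dom_get_no_atoms_in_layer plat_height no_atoms → Spec_get_no_atoms_in_layer plat_height no_atoms (get_no_atoms_in_layer plat_height no_atoms)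

-- ===== LEMMAS AND PROOFS =====

-- The common step: lexicographic max over (count, value) of qualifying pairs.
def pvM (n : Int) (acc : Int × Int) (p : Int × Int) : Int × Int :=
  if (9 ≤ p.1 ∧ n ≤ 20 * p.1) ∧ (p.2 > acc.2 ∨ (p.2 = acc.2 ∧ p.1 > acc.1)) then p else acc

lemma pvM_comm (n : Int) (a p q : Int × Int) : pvM n (pvM n a p) q = pvM n (pvM n a q) p := by
  rcases a with ⟨a1, a2⟩; rcases p with ⟨p1, p2⟩; rcases q with ⟨q1, q2⟩
  simp only [pvM]
  split_ifs <;> simp_all <;> (try constructor) <;> omega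

-- One representative value per run, and the run pairs (value, run length).
def pvRunVals : List Int → List Int
  | [] => []
  | v :: t => v :: pvRunVals (t.dropWhile (fun x => decide (x = v)))
termination_by s => s.length
decreasing_by
  all_goals
    simpa using Nat.lt_succ_of_le (List.length_dropWhile_le (fun x => decide (x = v)) t)

def pvRunPairs : List Int → List (Int × Int)
  | [] => []
  | v :: t => (v, (1 + (t.takeWhile (fun x => decide (x = v))).length : Int)) ::
      pvRunPairs (t.dropWhile (fun x => decide (x = v)))
termination_by s => s.length
decreasing_by
  all_goals
    simpa using Nat.lt_succ_of_le (List.length_dropWhile_le (fun x => decide (x = v)) t)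

lemma pv_dropWhile_gt (v : Int) (t : List Int) (h : (v :: t).Pairwise (· ≤ ·)) :
    ∀ x ∈ t.dropWhile (fun x => decide (x = v)), v < x := by
  induction t with
  | nil => simp
  | cons y t' ih =>
    intro x hx
    rw [List.dropWhile_cons] at hx
    by_cases hy : y = v
    · simp only [hy, decide_true] at hx
      have h' : (v :: t').Pairwise (· ≤ ·) := by
        rcases h with - | ⟨h1, h2⟩
        rcases h2 with - | ⟨h3, h4⟩
        exact List.Pairwise.cons (by intro b hb; exact h1 b (List.mem_cons_of_mem _ hb)) h4
      exact ih h' x hx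
    · simp only [hy, decide_false] at hx
      have hvy : v ≤ y := (List.pairwise_cons.mp h).1 y (by simp)
      have hvy' : v < y := lt_of_le_of_ne hvy (fun e => hy e.symm)
      rcases List.mem_cons.mp hx with rfl | hx
      · exact hvy'
      · have : y ≤ x := (List.pairwise_cons.mp ((List.pairwise_cons.mp h).2)).1 x hx
        omega

lemma pv_pairwise_rest (v : Int) (t : List Int) (h : (v :: t).Pairwise (· ≤ ·)) :
    (t.dropWhile (fun x => decide (x = v))).Pairwise (· ≤ ·) :=
  List.Pairwise.sublist (t.dropWhile_sublist _) (List.pairwise_cons.mp h).2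

lemma pvRunVals_cons (v : Int) (t : List Int) :
    pvRunVals (v :: t) = v :: pvRunVals (t.dropWhile (fun x => decide (x = v))) := by
  rw [pvRunVals.eq_def]

lemma pvRunPairs_cons (v : Int) (t : List Int) :
    pvRunPairs (v :: t) = (v, (1 + (t.takeWhile (fun x => decide (x = v))).length : Int)) ::
      pvRunPairs (t.dropWhile (fun x => decide (x = v))) := by
  rw [pvRunPairs.eq_def]

lemma pvRunLoop_cons (n v bv bc : Int) (t : List Int) :
    pvRunLoop n (v :: t) bv bc =
      if (9 ≤ v ∧ n ≤ 20 * v) ∧ (1 + (t.takeWhile (fun x => decide (x = v))).length : Int) ≥ bc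
      then pvRunLoop n (t.dropWhile (fun x => decide (x = v))) v (1 + (t.takeWhile (fun x => decide (x = v))).length)
      else pvRunLoop n (t.dropWhile (fun x => decide (x = v))) bv bc := by
  rw [pvRunLoop.eq_def]

lemma pvRunVals_subset : ∀ (s : List Int), ∀ x ∈ pvRunVals s, x ∈ s := by
  intro s
  fun_induction pvRunVals with
  | case1 => simp
  | case2 v t ih =>
    intro x hx
    rcases List.mem_cons.mp hx with rfl | h
    · simp
    · exact List.mem_cons_of_mem _ ((t.dropWhile_sublist _).mem (ih x h))

lemma pvRunVals_mem : ∀ (s : List Int), s.Pairwise (· ≤ ·) → ∀ (x : Int),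
    (x ∈ pvRunVals s ↔ x ∈ s) := by
  intro s
  induction s using pvRunVals.induct with
  | case1 => simp [pvRunVals]
  | case2 v t ih =>
    intro hs x
    rw [pvRunVals_cons]
    constructor
    · intro hx
      exact pvRunVals_subset (v :: t) x (by rw [pvRunVals_cons]; exact hx)
    · intro hx
      rcases List.mem_cons.mp hx with rfl | hx
      · exact List.mem_cons_self
      · rw [← List.takeWhile_append_dropWhile (p := fun x => decide (x = v)) (l := t)] at hx
        rcases List.mem_append.mp hx with hx | hx
        · have : x = v := by simpa using List.mem_takeWhile_imp hx
          simp [this]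
        · exact List.mem_cons_of_mem _ ((ih (pv_pairwise_rest v t hs) x).mpr hx)

lemma pvRunVals_nodup : ∀ (s : List Int), s.Pairwise (· ≤ ·) → (pvRunVals s).Nodup := by
  intro s
  induction s using pvRunVals.induct with
  | case1 => intro _; simp [pvRunVals]
  | case2 v t ih =>
    intro hs
    rw [pvRunVals_cons]
    refine List.nodup_cons.mpr ⟨?_, ih (pv_pairwise_rest v t hs)⟩
    intro hv
    have hmem := pvRunVals_subset _ v hv
    have := pv_dropWhile_gt v t hs v hmem
    omega

lemma pvRunPairs_eq : ∀ (s : List Int), s.Pairwise (· ≤ ·) →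
    pvRunPairs s = (pvRunVals s).map (fun v => (v, (s.count v : Int))) := by
  intro s
  induction s using pvRunVals.induct with
  | case1 => intro _; simp [pvRunPairs, pvRunVals]
  | case2 v t ih =>
    intro hs
    rw [pvRunPairs_cons, pvRunVals_cons, List.map_cons]
    have htw : ∀ x ∈ t.takeWhile (fun x => decide (x = v)), x = v := by
      intro x hx; simpa using List.mem_takeWhile_imp hx
    have hsplit : t = t.takeWhile (fun x => decide (x = v)) ++ t.dropWhile (fun x => decide (x = v)) :=
      (List.takeWhile_append_dropWhile).symm
    have hcount_head : ((v :: t).count v : Int) =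
        1 + (t.takeWhile (fun x => decide (x = v))).length := by
      have h1 : (t.takeWhile (fun x => decide (x = v))).count v =
          (t.takeWhile (fun x => decide (x = v))).length :=
        List.count_eq_length.mpr (fun b hb => (htw b hb).symm)
      have h2 : (t.dropWhile (fun x => decide (x = v))).count v = 0 :=
        List.count_eq_zero.mpr (fun hv => by have := pv_dropWhile_gt v t hs v hv; omega)
      have : (v :: t).count v = t.count v + 1 := List.count_cons_self
      rw [this]
      conv_lhs => rw [hsplit]
      rw [List.count_append, h1, h2]
      push_cast
      ring
    rw [← hcount_head, ih (pv_pairwise_rest v t hs)]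
    congr 1
    apply List.map_congr_left
    intro x hx
    have hxmem := pvRunVals_subset _ x hx
    have hgt : v < x := pv_dropWhile_gt v t hs x hxmem
    have h1 : (v :: t).count x = t.count x := by
      rw [List.count_cons_of_ne (by omega) ]
    have h2 : (t.takeWhile (fun x => decide (x = v))).count x = 0 :=
      List.count_eq_zero.mpr (fun hv => by have := htw x hv; omega)
    have : t.count x = (t.dropWhile (fun x => decide (x = v))).count x := by
      conv_lhs => rw [hsplit]
      rw [List.count_append, h2]; omega
    simp only [h1, this]

-- pvRunLoop is the foldl of pvM over the run pairs: ascending order + '≥' = the lex-max rule,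
-- given the invariant that bv is below every qualifying upcoming value.
lemma pvRunLoop_eq_foldl (n : Int) :
    ∀ (k : Nat) (s : List Int), s.length ≤ k → s.Pairwise (· ≤ ·) →
    ∀ (bv bc : Int), (∀ x ∈ s, 9 ≤ x → bv < x) →
    pvRunLoop n s bv bc = ((pvRunPairs s).foldl (pvM n) (bv, bc)).1 := by
  intro k
  induction k with
  | zero =>
    intro s hlen _ bv bc _
    have : s = [] := List.eq_nil_of_length_eq_zero (Nat.le_zero.mp hlen)
    subst this
    simp [pvRunLoop, pvRunPairs]
  | succ k ih =>
    intro s hlen hs bv bc hinv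
    cases s with
    | nil => simp [pvRunLoop, pvRunPairs]
    | cons v t =>
      rw [pvRunLoop_cons, pvRunPairs_cons, List.foldl_cons]
      set c : Int := (1 + (t.takeWhile (fun x => decide (x = v))).length : Int) with hc
      set rest := t.dropWhile (fun x => decide (x = v)) with hrest
      have hlen' : rest.length ≤ k := by
        have h1 : rest.length ≤ t.length := by
          rw [hrest]; exact List.length_dropWhile_le _ _
        simp only [List.length_cons] at hlen
        omega
      have hs' : rest.Pairwise (· ≤ ·) := pv_pairwise_rest v t hs
      have hrest_gt : ∀ x ∈ rest, v < x := pv_dropWhile_gt v t hs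
      by_cases hq : 9 ≤ v ∧ n ≤ 20 * v
      · by_cases hcb : c ≥ bc
        · have hbv : bv < v := hinv v List.mem_cons_self hq.1
          have hM : pvM n (bv, bc) (v, c) = (v, c) := by
            simp only [pvM]
            rw [if_pos]
            exact ⟨hq, by omega⟩
          rw [if_pos ⟨hq, hcb⟩, hM]
          exact ih rest hlen' hs' v c (fun x hx _ => hrest_gt x hx)
        · have hM : pvM n (bv, bc) (v, c) = (bv, bc) := by
            simp only [pvM]
            rw [if_neg]
            rintro ⟨-, h⟩; omega
          rw [if_neg (fun h => hcb h.2), hM]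
          exact ih rest hlen' hs' bv bc
            (fun x hx h9 => hinv x (List.mem_cons_of_mem _ ((t.dropWhile_sublist _).mem hx)) h9)
      · have hM : pvM n (bv, bc) (v, c) = (bv, bc) := by
          simp only [pvM]
          rw [if_neg]
          rintro ⟨h, -⟩; exact hq h
        rw [if_neg (fun h => hq h.1), hM]
        exact ih rest hlen' hs' bv bc
          (fun x hx h9 => hinv x (List.mem_cons_of_mem _ ((t.dropWhile_sublist _).mem hx)) h9)

-- ===== VERDICT (by name: the statement is the Claim_ definition above) =====
theorem get_no_atoms_in_layer_spec : Claim_equal_get_no_atoms_in_layer := by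
  intro l n _
  unfold Spec_get_no_atoms_in_layer
  have hA : get_no_atoms_in_layer l n =
      (((PySem.Set.ofList l).map (fun k => (k, (l.count k : Int)))).foldl (pvM n) (0, -1)).1 := by
    unfold get_no_atoms_in_layer
    simp only [PySem.Dict.foldl_insert_getD_add_one_eq_counter, PySem.Dict.items_counter]
    rfl
  set s := PySem.List.sorted l (fun x => x) false with hsdef
  have hp : s.Perm l := PySem.List.sorted_perm l (fun x => x) false
  have hsort : s.Pairwise (· ≤ ·) := by
    simpa using PySem.List.sorted_pairwise (xs := l) (key := fun x => x)
  have hB : get_no_atoms_in_layer_alt l n =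
      (((pvRunVals s).map (fun k => (k, (l.count k : Int)))).foldl (pvM n) (0, -1)).1 := by
    unfold get_no_atoms_in_layer_alt
    rw [← hsdef, pvRunLoop_eq_foldl n s.length s le_rfl hsort 0 (-1) (by intro x _ h; omega),
        pvRunPairs_eq s hsort]
    congr 2
    apply List.map_congr_left
    intro v _
    rw [hp.count_eq]
  rw [hA, hB]
  have hperm : ((PySem.Set.ofList l).map (fun k => (k, (l.count k : Int)))).Perm
      ((pvRunVals s).map (fun k => (k, (l.count k : Int)))) := by
    apply List.Perm.map
    apply (List.perm_ext_iff_of_nodup (PySem.Set.nodup_ofList l) (pvRunVals_nodup s hsort)).mpr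
    intro x
    rw [PySem.Set.mem_ofList, pvRunVals_mem s hsort, hp.mem_iff]
  have : RightCommutative (pvM n) := ⟨fun a p q => pvM_comm n a p q⟩
  rw [hperm.foldl_eq]
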